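-- pv_equiv track=rewrite | github.com/Ian-au789/SSAFY_TIL_APS_basic | IM problem/컨테이너 운반/23488.py | shipping
-- ===== SOURCE A (Python) =====
-- def shipping(length_c, length_t, cargo_list, truck_list):
--     max_weight = 0
--
--     cargo_list.sort(reverse=1)            # 내림차순으로 정렬
--     truck_list.sort(reverse=1)
--
--     for i in range(length_t):
--         for j in range(length_c):
--             if truck_list[i] >= cargo_list[j]:         # 트럭이 운반할 수 있는 화물의 무게 탐색
--                 max_weight += cargo_list[j]            # 최대 무게에 더하기
--                 cargo_list.remove(cargo_list[j])       # 적재한 화물은 리스트에서 제거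
--                 length_c -= 1                          # 탐색 범위 조정
--                 break
--
--     return max_weight
-- ===== SOURCE B (Python) =====
-- def shipping(length_c, length_t, cargo_list, truck_list):
--     # Return-value equivalent to A; A additionally removes loaded cargo from
--     # cargo_list in place, B only sorts the lists in place.
--     cargo_list.sort(reverse=True)
--     truck_list.sort(reverse=True)
--     cargos = cargo_list[:max(length_c, 0)]
--     trucks = truck_list[:max(length_t, 0)]
--     total = 0
--     j = 0
--     n = len(cargos)
--     for cap in trucks:
--         while j < n and cargos[j] > cap:
--             j += 1
--         if j < n:
--             total += cargos[j]
--             j += 1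
--     return total
-- ===== Notes on version B (the rewrite author's own statement) =====
-- stated objective: faster
-- what changed: replaces A's per-truck rescan of the cargo list (inner index loop plus list.remove) with a single two-pointer sweep over the descending-sorted trucks and cargo prefixes
-- outside the precondition, e.g. on shipping(2, 1, [1], [5]): A returns 1, B returns 1; on shipping(2, 1, [1], [0]): A raises IndexError, B returns 0
import Mathlib
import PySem

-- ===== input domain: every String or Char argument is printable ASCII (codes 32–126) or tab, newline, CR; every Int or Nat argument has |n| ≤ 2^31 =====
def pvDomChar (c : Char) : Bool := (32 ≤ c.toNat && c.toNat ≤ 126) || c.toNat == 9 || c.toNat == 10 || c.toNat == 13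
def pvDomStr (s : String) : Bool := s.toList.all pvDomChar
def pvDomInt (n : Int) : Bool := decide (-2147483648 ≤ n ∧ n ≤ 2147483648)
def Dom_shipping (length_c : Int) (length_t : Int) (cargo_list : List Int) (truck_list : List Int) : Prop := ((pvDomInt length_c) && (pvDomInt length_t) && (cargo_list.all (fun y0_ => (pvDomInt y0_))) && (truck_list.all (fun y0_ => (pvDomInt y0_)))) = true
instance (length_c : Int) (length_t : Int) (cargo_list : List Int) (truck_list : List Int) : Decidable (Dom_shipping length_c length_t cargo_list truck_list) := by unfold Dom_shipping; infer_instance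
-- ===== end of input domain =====

-- B replaces A's per-truck rescan of the cargo list (inner index loop + list.remove) with one
-- two-pointer sweep over the descending-sorted trucks and cargo; return-value equivalence only
-- (A also removes loaded cargo from cargo_list in place, B only sorts the lists in place).


-- ===== PORT A =====
-- inner 'for j in range(length_c): if truck_list[i] >= cargo_list[j]: ... break'
-- returns the first cargo the truck can carry; none = no break (or an out-of-range access,
-- which Pre_ excludes)
def shippingInner (tl : List Int) (i : Int) (cargo : List Int) : List Int → Option Int
  | [] => none
  | j :: js =>
    match PySem.List.pyGet? tl i, PySem.List.pyGet? cargo j with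
    | some t, some c => if t ≥ c then some c else shippingInner tl i cargo js
    | _, _ => none

-- outer 'for i in range(length_t)' carrying (cargo_list, length_c, max_weight);
-- cargo_list.remove(c) = remove?; c is always a member, so the getD default never fires
def shippingOuter (tl : List Int) : List Int → List Int → Int → Int → Int
  | [], _, _, mw => mw
  | i :: is, cargo, lc, mw =>
    match shippingInner tl i cargo (PySem.List.pyRange 0 lc 1) with
    | some c => shippingOuter tl is ((PySem.List.remove? cargo c).getD cargo) (lc - 1) (mw + c)
    | none => shippingOuter tl is cargo lc mw

def shipping (length_c : Int) (length_t : Int) (cargo_list : List Int) (truck_list : List Int) : Int :=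
  let cargo := PySem.List.sorted cargo_list (fun x => x) true
  let truck := PySem.List.sorted truck_list (fun x => x) true
  shippingOuter truck (PySem.List.pyRange 0 length_t 1) cargo length_c 0

-- ===== PORT B =====
-- 'while j < n and cargos[j] > cap: j += 1'
def altSkip (cargos : List Int) (cap : Int) (j : Nat) : Nat :=
  if h : j < cargos.length then
    if cap < cargos[j] then altSkip cargos cap (j + 1) else j
  else j
termination_by cargos.length - j

-- 'for cap in trucks: ... if j < n: total += cargos[j]; j += 1'
def altLoop (cargos : List Int) : List Int → Nat → Int → Int
  | [], _, total => total
  | cap :: rest, j, total =>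
    let j' := altSkip cargos cap j
    if h : j' < cargos.length then altLoop cargos rest (j' + 1) (total + cargos[j'])
    else altLoop cargos rest j' total

def shipping_alt (length_c : Int) (length_t : Int) (cargo_list : List Int) (truck_list : List Int) : Int :=
  let cargo := PySem.List.sorted cargo_list (fun x => x) true
  let truck := PySem.List.sorted truck_list (fun x => x) true
  let cargos := PySem.List.slice cargo none (some (max length_c 0))
  let trucks := PySem.List.slice truck none (some (max length_t 0))
  altLoop cargos trucks 0 0

-- ===== PRECONDITION & SPEC =====
-- Pre_ excludes inputs whose declared counts exceed the actual list lengths: there A scans past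
-- the end of a list and can raise IndexError (on some such inputs A still happens to return
-- because the break fires first).
def Pre_shipping (length_c : Int) (length_t : Int) (cargo_list : List Int) (truck_list : List Int) : Prop :=
  length_c ≤ (cargo_list.length : Int) ∧ length_t ≤ (truck_list.length : Int)
instance (length_c : Int) (length_t : Int) (cargo_list : List Int) (truck_list : List Int) : Decidable (Pre_shipping length_c length_t cargo_list truck_list) := by unfold Pre_shipping; infer_instance

def pvWitness_shipping : Int × Int × List Int × List Int := (3, 2, [4, 1, 7], [5, 3])

def Spec_shipping (length_c : Int) (length_t : Int) (cargo_list : List Int) (truck_list : List Int) (out : Int) : Prop := out = shipping_alt length_c length_t cargo_list truck_list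
instance (length_c : Int) (length_t : Int) (cargo_list : List Int) (truck_list : List Int) (out : Int) : Decidable (Spec_shipping length_c length_t cargo_list truck_list out) := by unfold Spec_shipping; infer_instance

-- ===== CLAIM (what is proved, stated in full; the proofs are below) =====
def Claim_equal_shipping : Prop := ∀ (length_c : Int) (length_t : Int) (cargo_list : List Int) (truck_list : List Int), Dom_shipping length_c length_t cargo_list truck_list → Pre_shipping length_c length_t cargo_list truck_list → Spec_shipping length_c length_t cargo_list truck_list (shipping length_c length_t cargo_list truck_list)

-- ===== LEMMAS AND PROOFS =====

-- list-level model of A's outer loop: P is the considered prefix of the cargo list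
def modelA : List Int → List Int → Int → Int
  | [], _, mw => mw
  | t :: ts, P, mw =>
    match P.find? (fun c => decide (t ≥ c)) with
    | some c => modelA ts (P.erase c) (mw + c)
    | none => modelA ts P mw

-- list-level model of B's sweep: rem is the not-yet-passed suffix of the cargo list
def modelB : List Int → List Int → Int → Int
  | [], _, total => total
  | cap :: ts, rem, total =>
    match rem.dropWhile (fun c => decide (cap < c)) with
    | [] => modelB ts [] total
    | c :: r => modelB ts r (total + c)

theorem altSkip_drop (cargos : List Int) (cap : Int) :
    ∀ j, cargos.drop (altSkip cargos cap j)
      = (cargos.drop j).dropWhile (fun c => decide (cap < c)) := by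
  intro j
  induction hn : cargos.length - j using Nat.strong_induction_on generalizing j with
  | _ n ih =>
    rw [altSkip]
    by_cases h : j < cargos.length
    · rw [List.drop_eq_getElem_cons h, List.dropWhile_cons]
      by_cases hc : cap < cargos[j]
      · simp only [h, dif_pos, hc, if_pos, decide_true]
        exact ih (cargos.length - (j+1)) (by omega) (j+1) rfl
      · rw [dif_pos h, if_neg hc]
        simp only [hc, decide_false, Bool.false_eq_true, if_false]
        rw [← List.drop_eq_getElem_cons h]
    · rw [dif_neg h]
      rw [List.drop_eq_nil_of_le (le_of_not_gt h)]
      simp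

theorem altLoop_eq_model (cargos : List Int) :
    ∀ (ts : List Int) (j : Nat) (total : Int),
      altLoop cargos ts j total = modelB ts (cargos.drop j) total := by
  intro ts
  induction ts with
  | nil => intro j total; rfl
  | cons cap rest ih =>
    intro j total
    have hd := altSkip_drop cargos cap j
    rw [altLoop, modelB]
    by_cases h : altSkip cargos cap j < cargos.length
    · rw [List.drop_eq_getElem_cons h] at hd
      rw [← hd]
      rw [dif_pos h, ih]
    · have : cargos.drop (altSkip cargos cap j) = [] := List.drop_eq_nil_of_le (le_of_not_gt h)
      rw [this] at hd
      rw [← hd, dif_neg h, ih, this]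

theorem inner_eq_find (tl : List Int) (i : Int) (t : Int)
    (ht : PySem.List.pyGet? tl i = some t) (cargo : List Int) :
    ∀ (a lc : Int), 0 ≤ a → lc ≤ (cargo.length : Int) →
      shippingInner tl i cargo (PySem.List.pyRange a lc 1)
        = ((cargo.take lc.toNat).drop a.toNat).find? (fun c => decide (t ≥ c)) := by
  intro a lc ha hlc
  induction hn : (lc - a).toNat generalizing a with
  | zero =>
    rw [PySem.List.pyRange_one_eq_nil (by omega)]
    rw [List.drop_eq_nil_of_le (by simp [List.length_take]; omega)]
    rfl
  | succ n ihn =>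
    have hab : a < lc := by omega
    rw [PySem.List.pyRange_one_cons hab]
    rw [shippingInner, ht]
    have hget : PySem.List.pyGet? cargo a = some (cargo[a.toNat]'(by omega)) := by
      rw [PySem.List.pyGet?_of_nonneg (h := ha)]; exact List.getElem?_eq_getElem _
    rw [hget]
    have hlt : a.toNat < (cargo.take lc.toNat).length := by simp [List.length_take]; omega
    rw [List.drop_eq_getElem_cons hlt, List.find?_cons]
    have hcoe : (cargo.take lc.toNat)[a.toNat]'hlt = cargo[a.toNat]'(by omega) := List.getElem_take
    rw [hcoe]
    by_cases hge : t ≥ cargo[a.toNat]'(by omega)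
    · simp [hge]
    · have h1 := ihn (a + 1) (by omega) (by omega)
      have h2 : (a + 1).toNat = a.toNat + 1 := by omega
      rw [h2] at h1
      simp only [hge, decide_false, h1, if_false]

theorem outer_eq_model (tl : List Int) (lt : Int) (hlt : lt ≤ (tl.length : Int)) :
    ∀ (n : Nat) (a : Int), 0 ≤ a → (lt - a).toNat = n →
    ∀ (cargo : List Int) (lc mw : Int), lc ≤ (cargo.length : Int) →
      shippingOuter tl (PySem.List.pyRange a lt 1) cargo lc mw
        = modelA ((tl.drop a.toNat).take n) (cargo.take lc.toNat) mw := by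
  intro n
  induction n with
  | zero =>
    intro a ha hn cargo lc mw hlc
    rw [PySem.List.pyRange_one_eq_nil (by omega), List.take_zero]
    rfl
  | succ n ih =>
    intro a ha hn cargo lc mw hlc
    have hab : a < lt := by omega
    have halen : a.toNat < tl.length := by omega
    rw [PySem.List.pyRange_one_cons hab]
    have hta : PySem.List.pyGet? tl a = some (tl[a.toNat]'halen) := by
      rw [PySem.List.pyGet?_of_nonneg (h := ha)]; exact List.getElem?_eq_getElem _
    rw [List.drop_eq_getElem_cons halen, List.take_succ_cons]
    rw [shippingOuter, inner_eq_find tl a _ hta cargo 0 lc (le_refl 0) hlc]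
    simp only [Int.toNat_zero, List.drop_zero]
    rw [modelA]
    cases hfind : (cargo.take lc.toNat).find? (fun c => decide (tl[a.toNat]'halen ≥ c)) with
    | none =>
      dsimp only
      have := ih (a + 1) (by omega) (by omega) cargo lc mw hlc
      rw [this]
      have h2 : (a + 1).toNat = a.toNat + 1 := by omega
      rw [h2]
    | some c =>
      have hmemP : c ∈ cargo.take lc.toNat := List.mem_of_find?_eq_some hfind
      have hmem : c ∈ cargo := List.mem_of_mem_take hmemP
      have hpos : 0 < lc := by
        by_contra hneg
        have : lc.toNat = 0 := by omega
        rw [this, List.take_zero] at hmemP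
        exact absurd hmemP List.not_mem_nil
      dsimp only
      rw [PySem.List.remove?_eq_some_erase cargo c hmem, Option.getD_some]
      have hPlen : (cargo.take lc.toNat).length = lc.toNat := by simp [List.length_take]; omega
      have hsplit : cargo.erase c = (cargo.take lc.toNat).erase c ++ cargo.drop lc.toNat := by
        conv_lhs => rw [← List.take_append_drop lc.toNat cargo]
        exact List.erase_append_left _ hmemP
      have herlen : ((cargo.take lc.toNat).erase c).length = lc.toNat - 1 := by
        rw [List.length_erase_of_mem hmemP, hPlen]
      have htake : (cargo.erase c).take (lc - 1).toNat = (cargo.take lc.toNat).erase c := by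
        rw [hsplit]
        have : (lc - 1).toNat = ((cargo.take lc.toNat).erase c).length := by omega
        rw [this, List.take_left]
      have hlc' : lc - 1 ≤ ((cargo.erase c).length : Int) := by
        rw [List.length_erase_of_mem hmem]; omega
      have := ih (a + 1) (by omega) (by omega) (cargo.erase c) (lc - 1) (mw + c) hlc'
      rw [this, htake]
      have h2 : (a + 1).toNat = a.toNat + 1 := by omega
      rw [h2]

theorem find?_eq_head?_dropWhile (t : Int) (l : List Int) :
    l.find? (fun c => decide (t ≥ c)) = (l.dropWhile (fun c => decide (t < c))).head? := by
  induction l with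
  | nil => rfl
  | cons c r ih =>
    by_cases h : t ≥ c
    · simp [h, not_lt.mpr h]
    · simp only [List.find?_cons, List.dropWhile_cons, h, decide_false,
        lt_of_not_ge h, decide_true, if_true]
      exact ih

theorem model_eq : ∀ (ts : List Int), ts.Pairwise (· ≥ ·) → ∀ (H rem : List Int) (mw : Int),
    (∀ h ∈ H, ∀ t ∈ ts, t < h) →
    modelA ts (H ++ rem) mw = modelB ts rem mw := by
  intro ts
  induction ts with
  | nil => intros; rfl
  | cons t ts ih =>
    intro hpw H rem mw hH
    have hts : ∀ t' ∈ ts, t' ≤ t := fun t' h' => (List.pairwise_cons.mp hpw).1 t' h'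
    have hpw' : ts.Pairwise (· ≥ ·) := (List.pairwise_cons.mp hpw).2
    rw [modelA, modelB]
    have hHnone : H.find? (fun c => decide (t ≥ c)) = none :=
      List.find?_eq_none.mpr (fun c hc => by
        simp only [decide_eq_true_eq]
        exact not_le.mpr (hH c hc t List.mem_cons_self))
    rw [List.find?_append, hHnone, Option.none_or, find?_eq_head?_dropWhile]
    cases hdw : rem.dropWhile (fun c => decide (t < c)) with
    | nil =>
      dsimp only [List.head?]
      have hrem : ∀ c ∈ rem, t < c := fun c hc => by
        have := List.dropWhile_eq_nil_iff.mp hdw c hc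
        simpa using this
      have := ih hpw' (H ++ rem) [] mw (fun h hm t' ht' => by
        rcases List.mem_append.mp hm with h1 | h1
        · exact hH h h1 t' (List.mem_cons_of_mem t ht')
        · exact lt_of_le_of_lt (hts t' ht') (hrem h h1))
      rw [List.append_nil] at this
      exact this
    | cons c r =>
      dsimp only [List.head?]
      have hct : c ≤ t := by
        have hmem : c ∈ c :: r := List.mem_cons_self
        rw [← hdw] at hmem
        have h1 := List.head?_dropWhile_not (fun c => decide (t < c)) rem
        rw [hdw] at h1
        simpa using h1
      have hrem_split : rem = rem.takeWhile (fun c => decide (t < c)) ++ (c :: r) := by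
        conv_lhs => rw [← List.takeWhile_append_dropWhile (p := fun c => decide (t < c)) (l := rem)]
        rw [hdw]
      have hcH : c ∉ H := fun hc => absurd (hH c hc t List.mem_cons_self) (not_lt.mpr hct)
      have hcS : c ∉ rem.takeWhile (fun c => decide (t < c)) := fun hc => by
        have := List.mem_takeWhile_imp hc
        simp only [decide_eq_true_eq] at this
        exact absurd this (not_lt.mpr hct)
      have herase : (H ++ rem).erase c = (H ++ rem.takeWhile (fun c => decide (t < c))) ++ r := by
        conv_lhs => rw [hrem_split]
        rw [List.erase_append_right _ hcH, List.erase_append_right _ hcS, List.erase_cons_head,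
          List.append_assoc]
      rw [herase]
      exact ih hpw' _ r (mw + c) (fun h hm t' ht' => by
        rcases List.mem_append.mp hm with h1 | h1
        · exact hH h h1 t' (List.mem_cons_of_mem t ht')
        · have := List.mem_takeWhile_imp h1
          simp only [decide_eq_true_eq] at this
          exact lt_of_le_of_lt (hts t' ht') this)

-- ===== VERDICT (by name: the statement is the Claim_ definition above) =====
theorem shipping_spec : Claim_equal_shipping := by
  intro length_c length_t cargo_list truck_list _ hpre
  obtain ⟨h1, h2⟩ := hpre
  unfold Spec_shipping shipping shipping_alt
  have hclen : ((PySem.List.sorted cargo_list (fun x => x) true).length : Int) = cargo_list.length := by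
    rw [PySem.List.length_sorted]
  have htlen : ((PySem.List.sorted truck_list (fun x => x) true).length : Int) = truck_list.length := by
    rw [PySem.List.length_sorted]
  rw [outer_eq_model (PySem.List.sorted truck_list (fun x => x) true) length_t
      (by rw [htlen]; exact h2) length_t.toNat 0 le_rfl (by omega)
      (PySem.List.sorted cargo_list (fun x => x) true) length_c 0 (by rw [hclen]; exact h1)]
  rw [altLoop_eq_model]
  rw [PySem.List.slice_to _ (le_max_right length_c 0), PySem.List.slice_to _ (le_max_right length_t 0)]
  have hc : (max length_c 0).toNat = length_c.toNat := by omega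
  have ht : (max length_t 0).toNat = length_t.toNat := by omega
  rw [hc, ht]
  simp only [Int.toNat_zero, List.drop_zero]
  have hpw : ((PySem.List.sorted truck_list (fun x => x) true).take length_t.toNat).Pairwise (· ≥ ·) :=
    List.Pairwise.sublist (List.take_sublist _ _) (PySem.List.sorted_pairwise_rev truck_list (fun x => x))
  have := model_eq _ hpw []
      ((PySem.List.sorted cargo_list (fun x => x) true).take length_c.toNat) 0
      (fun h hm => absurd hm List.not_mem_nil)
  rw [List.nil_append] at this
  exact this
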